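-- pv_equiv track=rewrite | github.com/ValenzuelaRa/Backend | es_pregunta.py | es_pregunta
-- ===== SOURCE A (Python) =====
-- def es_pregunta(input_usuario):
--     """
--     Determina si el parametro ingresado es una pregunta y clasifica el tipo de pregunta.
--
--     Parámetros:
--     - input_usuario: El texto ingresado por el usuario que el agoritmo determinara si es una pregunta.
--
--     Retorna:
--     -      0: si no es una pregunta,
--            1: si es una pregunta con pronombres interrogativos,
--            2: si es una pregunta con adjetivos interrogativos,
--            3: si es una pregunta con adverbios interrogativos,
--            4: si es una pregunta con partículas interrogativas.
--     """
--
--     # Listas de palabras interrogativas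
--     pronombres_interrogativos = ['quien', 'que', 'cual', 'cuales', 'cuanto', 'cuantos', 'cuanta', 'cuantas', 'cuando', 'donde', 'por que', 'como']
--
--     adjetivos_interrogativos = ['que', 'cual', 'cuales', 'cuanto', 'cuantos', 'cuanta', 'cuántas']
--
--     adverbios_interrogativos = ['cuando', 'por que', 'como']
--
--     particulas_interrogativas = ["no","acaso","verdad","a que","o no","no es cierto","no es verdad","no es asi"]
--
--     # Convierte en minusculas el promt
--     input_usuario = input_usuario.lower()
--
--     # Divide el texto ingresado por el usuario en palabras y se asigna a la variable palabras
--     palabras = input_usuario.split()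
--
--     # Banderas para el tipo de pregunta
--     bandera = 0
--
--     # Verificar cada palabra en la cadena
--     for palabra in palabras:
--
--         if palabra in pronombres_interrogativos:
--             bandera = 1
--             return f'\nEs pregunta: "{input_usuario}"\n\nContiene la palabra: "{palabra}"\n\nTipo de pregunta: "Pronombres interrogativos": {bandera}'  # Pregunta con pronombres interrogativos
--
--         elif palabra in adjetivos_interrogativos:
--             bandera = 2
--             return f'\nEs pregunta: "{input_usuario}"\n\nContiene la palabra: "{palabra}"\n\nTipo de pregunta: "Pronombres interrogativos": {bandera}'  # Pregunta con adjetivos interrogativos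
--
--         elif palabra in adverbios_interrogativos:
--             bandera = 3
--             return f'\nEs pregunta: "{input_usuario}"\n\nContiene la palabra: "{palabra}"\n\nTipo de pregunta: "Pronombres interrogativos": {bandera}'  # Pregunta con adverbios interrogativos
--
--         elif palabra in particulas_interrogativas:
--             bandera = 4
--             return f'\nEs pregunta: "{input_usuario}"\n\nContiene la palabra: "{palabra}"\n\nTipo de pregunta: "Pronombres interrogativos": {bandera}'  # Pregunta con partículas interrogativas
--
--     return f'\n"{input_usuario}"No es pregunta: {bandera}'  # No es una pregunta
-- ===== SOURCE B (Python) =====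
-- PRONOMBRES = ['quien', 'que', 'cual', 'cuales', 'cuanto', 'cuantos', 'cuanta', 'cuantas', 'cuando', 'donde', 'por que', 'como']
-- ADJETIVOS = ['que', 'cual', 'cuales', 'cuanto', 'cuantos', 'cuanta', 'cuántas']
-- ADVERBIOS = ['cuando', 'por que', 'como']
-- PARTICULAS = ["no", "acaso", "verdad", "a que", "o no", "no es cierto", "no es verdad", "no es asi"]
--
--
-- def _primer_hit(palabras, lista):
--     """Earliest position of a word of `lista` in `palabras`, as (indice, palabra); None if absent."""
--     i = 0
--     for w in palabras:
--         if w in lista: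
--             return (i, w)
--         i += 1
--     return None
--
--
-- def _mejor(mejor, num, hit):
--     """Keep the better of the running best and a category's first hit,
--     ordered lexicographically by (position, category number)."""
--     if hit is None:
--         return mejor
--     i, w = hit
--     if mejor is None or (i, num) < (mejor[0], mejor[1]):
--         return (i, num, w)
--     return mejor
--
--
-- def es_pregunta(input_usuario):
--     # Staged passes: one scan per keyword category finds that category's earliest
--     # hit, then a lexicographic (position, category) minimum selects the answer.
--     texto = input_usuario.lower()
--     palabras = texto.split()
--     mejor = None
--     mejor = _mejor(mejor, 1, _primer_hit(palabras, PRONOMBRES))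
--     mejor = _mejor(mejor, 2, _primer_hit(palabras, ADJETIVOS))
--     mejor = _mejor(mejor, 3, _primer_hit(palabras, ADVERBIOS))
--     mejor = _mejor(mejor, 4, _primer_hit(palabras, PARTICULAS))
--     if mejor is None:
--         return f'\n"{texto}"No es pregunta: 0'
--     _, num, palabra = mejor
--     return f'\nEs pregunta: "{texto}"\n\nContiene la palabra: "{palabra}"\n\nTipo de pregunta: "Pronombres interrogativos": {num}'
-- ===== Notes on version B (the rewrite author's own statement) =====
-- stated objective: alternative
-- what changed: Instead of one scan over the words with a four-way elif per word, B makes one staged pass per keyword category computing that category's earliest hit, then selects the answer as the lexicographic minimum of (position, category number).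
import Mathlib
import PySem

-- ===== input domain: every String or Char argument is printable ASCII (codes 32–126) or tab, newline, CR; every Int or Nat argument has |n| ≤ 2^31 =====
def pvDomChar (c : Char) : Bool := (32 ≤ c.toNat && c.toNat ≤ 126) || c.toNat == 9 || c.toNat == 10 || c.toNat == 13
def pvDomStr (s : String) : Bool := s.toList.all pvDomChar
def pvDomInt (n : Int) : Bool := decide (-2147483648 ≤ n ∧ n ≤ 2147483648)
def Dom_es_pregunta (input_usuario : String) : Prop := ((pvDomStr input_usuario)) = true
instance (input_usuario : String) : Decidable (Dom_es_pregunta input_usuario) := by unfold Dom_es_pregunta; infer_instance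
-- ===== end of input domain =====

-- B replaces A's single scan with a four-way elif per word by one staged pass per
-- keyword category (earliest hit of that category) followed by a lexicographic
-- (position, category) minimum; objective: alternative algorithm, same cost.

-- ===== PORT A =====
def pvPronombres : List String := ["quien", "que", "cual", "cuales", "cuanto", "cuantos", "cuanta", "cuantas", "cuando", "donde", "por que", "como"]
def pvAdjetivos : List String := ["que", "cual", "cuales", "cuanto", "cuantos", "cuanta", "cuántas"]
def pvAdverbios : List String := ["cuando", "por que", "como"]
def pvParticulas : List String := ["no", "acaso", "verdad", "a que", "o no", "no es cierto", "no es verdad", "no es asi"]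

def pvFmtA (t p : String) (bandera : Int) : String :=
  "\nEs pregunta: \"" ++ t ++ "\"\n\nContiene la palabra: \"" ++ p ++
  "\"\n\nTipo de pregunta: \"Pronombres interrogativos\": " ++ PySem.Int.toStr bandera

def pvLoopA (t : String) : List String → String
  | [] => "\n\"" ++ t ++ "\"No es pregunta: " ++ PySem.Int.toStr 0
  | palabra :: rest =>
    if pvPronombres.contains palabra then pvFmtA t palabra 1
    else if pvAdjetivos.contains palabra then pvFmtA t palabra 2
    else if pvAdverbios.contains palabra then pvFmtA t palabra 3
    else if pvParticulas.contains palabra then pvFmtA t palabra 4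
    else pvLoopA t rest

def es_pregunta (input_usuario : String) : String :=
  let t := PySem.Str.lower input_usuario
  pvLoopA t (PySem.Str.split₀ t)

-- ===== PORT B =====
def pvPronB : List String := ["quien", "que", "cual", "cuales", "cuanto", "cuantos", "cuanta", "cuantas", "cuando", "donde", "por que", "como"]
def pvAdjB : List String := ["que", "cual", "cuales", "cuanto", "cuantos", "cuanta", "cuántas"]
def pvAdvB : List String := ["cuando", "por que", "como"]
def pvPartB : List String := ["no", "acaso", "verdad", "a que", "o no", "no es cierto", "no es verdad", "no es asi"]

-- _primer_hit: earliest (index, word) of `lista` in `palabras`; the counter i is the running index.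
def pvPrimerHit (lista : List String) : List String → Int → Option (Int × String)
  | [], _ => none
  | w :: rest, i => if lista.contains w then some (i, w) else pvPrimerHit lista rest (i + 1)

-- _mejor: keep the better of the running best and a category's first hit,
-- ordered lexicographically by (position, category number).
def pvMejor (mejor : Option (Int × Int × String)) (num : Int) (hit : Option (Int × String)) :
    Option (Int × Int × String) :=
  match hit with
  | none => mejor
  | some (i, w) =>
    match mejor with
    | none => some (i, num, w)
    | some (j, m, _) => if i < j ∨ (i = j ∧ num < m) then some (i, num, w) else mejor

def pvFmtB (t p : String) (num : Int) : String :=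
  "\nEs pregunta: \"" ++ t ++ "\"\n\nContiene la palabra: \"" ++ p ++
  "\"\n\nTipo de pregunta: \"Pronombres interrogativos\": " ++ PySem.Int.toStr num

def pvRender (t : String) : Option (Int × Int × String) → String
  | none => "\n\"" ++ t ++ "\"No es pregunta: 0"
  | some (_, num, palabra) => pvFmtB t palabra num

def es_pregunta_alt (input_usuario : String) : String :=
  let texto := PySem.Str.lower input_usuario
  let palabras := PySem.Str.split₀ texto
  let mejor := pvMejor (pvMejor (pvMejor (pvMejor none 1 (pvPrimerHit pvPronB palabras 0))
                  2 (pvPrimerHit pvAdjB palabras 0)) 3 (pvPrimerHit pvAdvB palabras 0))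
                  4 (pvPrimerHit pvPartB palabras 0)
  pvRender texto mejor

-- ===== PRECONDITION & SPEC =====
def Spec_es_pregunta (input_usuario : String) (out : String) : Prop := out = es_pregunta_alt input_usuario
instance (input_usuario : String) (out : String) : Decidable (Spec_es_pregunta input_usuario out) := by unfold Spec_es_pregunta; infer_instance

-- ===== CLAIM (what is proved, stated in full; the proofs are below) =====
def Claim_equal_es_pregunta : Prop := ∀ (input_usuario : String), Dom_es_pregunta input_usuario → Spec_es_pregunta input_usuario (es_pregunta input_usuario)

-- ===== LEMMAS AND PROOFS =====

def pvCombina (ws : List String) (i : Int) : Option (Int × Int × String) :=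
  pvMejor (pvMejor (pvMejor (pvMejor none 1 (pvPrimerHit pvPronB ws i))
      2 (pvPrimerHit pvAdjB ws i)) 3 (pvPrimerHit pvAdvB ws i)) 4 (pvPrimerHit pvPartB ws i)

lemma primerHit_ge (l : List String) (ws : List String) :
    ∀ (i j : Int) (w : String), pvPrimerHit l ws i = some (j, w) → i ≤ j := by
  induction ws with
  | nil => intro i j w h; simp [pvPrimerHit] at h
  | cons p rest ih =>
    intro i j w h
    rw [pvPrimerHit] at h
    by_cases hb : l.contains p = true
    · rw [if_pos hb] at h; simp at h; omega
    · rw [if_neg hb] at h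
      have := ih (i + 1) j w h; omega

lemma mejor_ge (m : Option (Int × Int × String)) (c : Int) (h : Option (Int × String)) (i : Int)
    (hm : ∀ j n u, m = some (j, n, u) → i ≤ j) (hh : ∀ j u, h = some (j, u) → i ≤ j) :
    ∀ j n u, pvMejor m c h = some (j, n, u) → i ≤ j := by
  intro j n u he
  cases h with
  | none => exact hm j n u he
  | some p =>
    obtain ⟨a, w⟩ := p
    have ha : i ≤ a := hh a w rfl
    cases m with
    | none => simp [pvMejor] at he; omega
    | some q =>
      obtain ⟨b, bm, bw⟩ := q
      have hb : i ≤ b := hm b bm bw rfl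
      simp only [pvMejor] at he
      split at he <;> (simp at he; omega)

lemma mejor_keep (i n : Int) (w : String) (c : Int) (h : Option (Int × String))
    (hge : ∀ j u, h = some (j, u) → i ≤ j) (hc : n < c) :
    pvMejor (some (i, n, w)) c h = some (i, n, w) := by
  cases h with
  | none => rfl
  | some p =>
    obtain ⟨a, u⟩ := p
    have ha : i ≤ a := hge a u rfl
    simp only [pvMejor]
    rw [if_neg]; omega

lemma mejor_beat (m : Option (Int × Int × String)) (i c : Int) (w : String)
    (hm : ∀ j n u, m = some (j, n, u) → i < j) :
    pvMejor m c (some (i, w)) = some (i, c, w) := by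
  cases m with
  | none => rfl
  | some q =>
    obtain ⟨b, bm, bw⟩ := q
    have hb : i < b := hm b bm bw rfl
    simp only [pvMejor]
    rw [if_pos]; omega

lemma main_lemma (t : String) (ws : List String) :
    ∀ i : Int, pvRender t (pvCombina ws i) = pvLoopA t ws := by
  induction ws with
  | nil =>
    intro i
    show pvRender t (pvCombina [] i) = "\n\"" ++ t ++ "\"No es pregunta: " ++ PySem.Int.toStr 0
    rw [show PySem.Int.toStr 0 = "0" from rfl, String.append_assoc,
        show "\"No es pregunta: " ++ "0" = "\"No es pregunta: 0" from rfl]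
    rfl
  | cons p rest ih =>
    intro i
    have hge : ∀ (l : List String) (j : Int) (u : String),
        pvPrimerHit l (p :: rest) i = some (j, u) → i ≤ j :=
      fun l => primerHit_ge l (p :: rest) i
    have hgt : ∀ (l : List String) (j : Int) (u : String),
        pvPrimerHit l rest (i + 1) = some (j, u) → i + 1 ≤ j :=
      fun l => primerHit_ge l rest (i + 1)
    have hnone : ∀ (k : Int) (j n : Int) (u : String),
        (none : Option (Int × Int × String)) = some (j, n, u) → k ≤ j := by
      intro _ _ _ _ h; cases h
    rw [pvLoopA]
    by_cases h1 : pvPronombres.contains p = true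
    · have e1 : pvPrimerHit pvPronB (p :: rest) i = some (i, p) := by
        rw [pvPrimerHit, if_pos (show pvPronB.contains p = true from h1)]
      unfold pvCombina
      rw [e1, show pvMejor none 1 (some (i, p)) = some (i, 1, p) from rfl,
          mejor_keep i 1 p 2 _ (hge pvAdjB) (by omega),
          mejor_keep i 1 p 3 _ (hge pvAdvB) (by omega),
          mejor_keep i 1 p 4 _ (hge pvPartB) (by omega), if_pos h1]
      rfl
    · have e1 : pvPrimerHit pvPronB (p :: rest) i = pvPrimerHit pvPronB rest (i + 1) := by
        rw [pvPrimerHit, if_neg (show ¬pvPronB.contains p = true from h1)]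
      have B1 : ∀ j n u, pvMejor none 1 (pvPrimerHit pvPronB rest (i + 1)) = some (j, n, u) →
          i + 1 ≤ j := mejor_ge _ _ _ _ (hnone (i + 1)) (hgt pvPronB)
      rw [if_neg h1]
      by_cases h2 : pvAdjetivos.contains p = true
      · have e2 : pvPrimerHit pvAdjB (p :: rest) i = some (i, p) := by
          rw [pvPrimerHit, if_pos (show pvAdjB.contains p = true from h2)]
        unfold pvCombina
        rw [e1, e2, mejor_beat _ i 2 p (fun j n u h => by have := B1 j n u h; omega),
            mejor_keep i 2 p 3 _ (hge pvAdvB) (by omega),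
            mejor_keep i 2 p 4 _ (hge pvPartB) (by omega), if_pos h2]
        rfl
      · have e2 : pvPrimerHit pvAdjB (p :: rest) i = pvPrimerHit pvAdjB rest (i + 1) := by
          rw [pvPrimerHit, if_neg (show ¬pvAdjB.contains p = true from h2)]
        have B2 : ∀ j n u,
            pvMejor (pvMejor none 1 (pvPrimerHit pvPronB rest (i + 1))) 2
              (pvPrimerHit pvAdjB rest (i + 1)) = some (j, n, u) → i + 1 ≤ j :=
          mejor_ge _ _ _ _ B1 (hgt pvAdjB)
        rw [if_neg h2]
        by_cases h3 : pvAdverbios.contains p = true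
        · have e3 : pvPrimerHit pvAdvB (p :: rest) i = some (i, p) := by
            rw [pvPrimerHit, if_pos (show pvAdvB.contains p = true from h3)]
          unfold pvCombina
          rw [e1, e2, e3, mejor_beat _ i 3 p (fun j n u h => by have := B2 j n u h; omega),
              mejor_keep i 3 p 4 _ (hge pvPartB) (by omega), if_pos h3]
          rfl
        · have e3 : pvPrimerHit pvAdvB (p :: rest) i = pvPrimerHit pvAdvB rest (i + 1) := by
            rw [pvPrimerHit, if_neg (show ¬pvAdvB.contains p = true from h3)]
          have B3 : ∀ j n u,
              pvMejor (pvMejor (pvMejor none 1 (pvPrimerHit pvPronB rest (i + 1))) 2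
                (pvPrimerHit pvAdjB rest (i + 1))) 3 (pvPrimerHit pvAdvB rest (i + 1)) =
                some (j, n, u) → i + 1 ≤ j :=
            mejor_ge _ _ _ _ B2 (hgt pvAdvB)
          rw [if_neg h3]
          by_cases h4 : pvParticulas.contains p = true
          · have e4 : pvPrimerHit pvPartB (p :: rest) i = some (i, p) := by
              rw [pvPrimerHit, if_pos (show pvPartB.contains p = true from h4)]
            unfold pvCombina
            rw [e1, e2, e3, e4,
                mejor_beat _ i 4 p (fun j n u h => by have := B3 j n u h; omega), if_pos h4]
            rfl
          · have e4 : pvPrimerHit pvPartB (p :: rest) i = pvPrimerHit pvPartB rest (i + 1) := by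
              rw [pvPrimerHit, if_neg (show ¬pvPartB.contains p = true from h4)]
            have : pvCombina (p :: rest) i = pvCombina rest (i + 1) := by
              unfold pvCombina; rw [e1, e2, e3, e4]
            rw [this, ih (i + 1), if_neg h4]

-- ===== VERDICT (by name: the statement is the Claim_ definition above) =====
theorem es_pregunta_spec : Claim_equal_es_pregunta := by
  intro input_usuario _
  unfold Spec_es_pregunta es_pregunta es_pregunta_alt
  exact (main_lemma _ _ 0).symm
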